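-- pv_equiv track=rewrite | github.com/Harjacober/CodeforcesSolvedProblems | vasyaAndString.py | vasya
-- ===== SOURCE A (Python) =====
-- def vasya(n, kere, string):
--     k = kere
--     #string = [a for a in stri]
--     count = 1
--     ans = count
--     for i in range(n-1):
--         for j in range(i+1, n):
--             if string[i] == string[j] :
--                 count += 1
--             else:
--                 if k > 0:
--                     count += 1
--                     k -= 1
--                 else:
--                     break
--         if count > ans:
--             ans = count
--         count = 1
--         k = kere
--     return ans
-- ===== SOURCE B (Python) =====
-- def _prefix(s, c):
--     # prefix counts: out[m] = number of occurrences of c in s[:m]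
--     out = [0]
--     for ch in s:
--         out.append(out[-1] + (1 if ch == c else 0))
--     return out
--
--
-- def vasya(n, kere, string):
--     k = kere if kere > 0 else 0
--     s = string[:n]
--     pre = {c: _prefix(s, c) for c in set(s)}
--     ans = 1
--     for i in range(n - 1):
--         p = pre[s[i]]
--         lo, hi = i + 1, n
--         # binary search: largest e in [i+1, n] such that the chars of s[i+1:e]
--         # differing from s[i] number at most k (predicate is antitone in e)
--         while lo < hi:
--             mid = (lo + hi + 1) // 2
--             if (mid - i - 1) - (p[mid] - p[i + 1]) <= k:
--                 lo = mid
--             else: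
--                 hi = mid - 1
--         if lo - i > ans:
--             ans = lo - i
--     return ans
-- ===== Notes on version B (the rewrite author's own statement) =====
-- stated objective: faster
-- what changed: A scans forward from every start position (quadratic); B precomputes per-character prefix counts once and finds each start's break point by binary search on the antitone mismatch-count predicate.
import Mathlib
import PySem

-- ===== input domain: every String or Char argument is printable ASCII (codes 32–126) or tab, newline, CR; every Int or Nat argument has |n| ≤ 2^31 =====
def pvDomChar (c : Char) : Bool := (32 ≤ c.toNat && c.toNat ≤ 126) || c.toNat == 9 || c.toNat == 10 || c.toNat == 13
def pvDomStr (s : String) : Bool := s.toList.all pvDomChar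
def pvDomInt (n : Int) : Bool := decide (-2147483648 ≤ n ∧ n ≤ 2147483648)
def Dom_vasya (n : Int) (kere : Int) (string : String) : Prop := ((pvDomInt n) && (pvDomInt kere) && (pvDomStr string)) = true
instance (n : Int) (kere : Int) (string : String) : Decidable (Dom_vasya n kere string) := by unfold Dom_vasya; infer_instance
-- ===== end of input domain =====

-- B replaces A's quadratic forward scan from every start by per-character prefix counts
-- plus a binary search for each start's break point (objective: faster).


-- ===== PORT A =====
-- inner 'for j in range(i+1, n)' loop with its break; state = (count, k)
def vasyaInner (chars : List Char) (ci : Char) : List Int → Int → Int → Int × Int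
  | [], count, k => (count, k)
  | j :: js, count, k =>
    match PySem.List.pyGet? chars j with
    | none => (count, k)   -- IndexError in Python; excluded by Pre_vasya
    | some cj =>
      if cj == ci then vasyaInner chars ci js (count + 1) k
      else if k > 0 then vasyaInner chars ci js (count + 1) (k - 1)
      else (count, k)

-- outer loop body; state = (count, ans, k)
def vasyaStepA (chars : List Char) (kere : Int) (n : Int) (st : Int × Int × Int) (i : Int) : Int × Int × Int :=
  match PySem.List.pyGet? chars i with
  | none => st   -- IndexError in Python; excluded by Pre_vasya
  | some ci =>
    let r := vasyaInner chars ci (PySem.List.pyRange (i + 1) n 1) st.1 st.2.2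
    let ans' := if r.1 > st.2.1 then r.1 else st.2.1
    (1, ans', kere)

def vasya (n : Int) (kere : Int) (string : String) : Int :=
  ((PySem.List.pyRange 0 (n - 1) 1).foldl (vasyaStepA string.toList kere n) (1, 1, kere)).2.1

-- ===== PORT B =====
-- _prefix(s, c): out = [0]; for ch in s: out.append(out[-1] + (1 if ch == c else 0))
def prefAux (c : Char) : List Char → List Int → List Int
  | [], out => out
  | ch :: rest, out => prefAux c rest (out ++ [out.getLastD 0 + (if ch == c then 1 else 0)])

def prefixB (s : List Char) (c : Char) : List Int := prefAux c s [0]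

-- the 'while lo < hi' binary-search loop
def bsearch (p : List Int) (i : Int) (k : Int) (lo : Int) (hi : Int) : Int :=
  if _h : lo < hi then
    let mid := PySem.Int.floordiv (lo + hi + 1) 2
    if (mid - i - 1) - (PySem.List.pyGetD p mid 0 - PySem.List.pyGetD p (i + 1) 0) ≤ k then
      bsearch p i k mid hi
    else
      bsearch p i k lo (mid - 1)
  else lo
termination_by (hi - lo).toNat
decreasing_by
  all_goals
    have hb := PySem.Int.floordiv_two_mid_bounds (lo := lo + 1) (hi := hi) (by omega)
    have he : lo + 1 + hi = lo + hi + 1 := by ring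
    rw [he] at hb
    omega

-- body of 'for i in range(n-1)'
def vasyaStepB (s : List Char) (pre : PySem.Dict Char (List Int)) (k : Int) (n : Int)
    (ans : Int) (i : Int) : Int :=
  match PySem.List.pyGet? s i with
  | none => ans   -- IndexError in Python; excluded by Pre_vasya
  | some ci =>
    let p := (pre.get? ci).getD []   -- KeyError impossible: ci ∈ set(s)
    let lo := bsearch p i k (i + 1) n
    if lo - i > ans then lo - i else ans

def vasya_alt (n : Int) (kere : Int) (string : String) : Int :=
  let k := if kere > 0 then kere else 0
  let s := PySem.List.slice string.toList none (some n)
  -- pre = {c: _prefix(s, c) for c in set(s)}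
  let pre := (PySem.Set.ofList s).foldl (fun d c => d.insert c (prefixB s c)) PySem.Dict.empty
  (PySem.List.pyRange 0 (n - 1) 1).foldl (vasyaStepB s pre k n) 1

-- ===== PRECONDITION & SPEC =====
-- A raises IndexError exactly when n ≥ 2 and n > len(string); those inputs are excluded.
def Pre_vasya (n : Int) (kere : Int) (string : String) : Prop :=
  n ≤ 1 ∨ n ≤ (string.toList.length : Int)
instance (n : Int) (kere : Int) (string : String) : Decidable (Pre_vasya n kere string) := by
  unfold Pre_vasya; infer_instance

def pvWitness_vasya : Int × Int × String := (3, 1, "aba")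

def Spec_vasya (n : Int) (kere : Int) (string : String) (out : Int) : Prop := out = vasya_alt n kere string
instance (n : Int) (kere : Int) (string : String) (out : Int) : Decidable (Spec_vasya n kere string out) := by unfold Spec_vasya; infer_instance

-- ===== CLAIM (what is proved, stated in full; the proofs are below) =====
def Claim_equal_vasya : Prop := ∀ (n : Int) (kere : Int) (string : String), Dom_vasya n kere string → Pre_vasya n kere string → Spec_vasya n kere string (vasya n kere string)

-- ===== LEMMAS AND PROOFS =====

-- the common specification: greedy extension length from a start, over the suffix
def gExt (c : Char) : Int → List Char → Int
  | _, [] => 0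
  | k, x :: xs => if x == c then 1 + gExt c k xs else if k > 0 then 1 + gExt c (k - 1) xs else 0

theorem gExt_nonneg (c : Char) (k : Int) (l : List Char) : 0 ≤ gExt c k l := by
  induction l generalizing k with
  | nil => simp [gExt]
  | cons x xs ih =>
    simp only [gExt]
    split_ifs with h1 h2
    · have := ih k; omega
    · have := ih (k - 1); omega
    · omega

theorem gExt_le_length (c : Char) (k : Int) (l : List Char) : gExt c k l ≤ (l.length : Int) := by
  induction l generalizing k with
  | nil => simp [gExt]
  | cons x xs ih =>
    simp only [gExt, List.length_cons]
    split_ifs with h1 h2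
    · have := ih k; push_cast; omega
    · have := ih (k - 1); push_cast; omega
    · push_cast; omega

theorem gExt_clip (c : Char) (k : Int) (l : List Char) :
    gExt c k l = gExt c (if k > 0 then k else 0) l := by
  by_cases hk : k > 0
  · rw [if_pos hk]
  · rw [if_neg hk]
    induction l with
    | nil => simp [gExt]
    | cons x xs ih =>
      simp only [gExt, gt_iff_lt, lt_irrefl, if_false]
      by_cases h1 : (x == c) = true
      · rw [if_pos h1, if_pos h1, ih]
      · rw [if_neg h1, if_neg h1, if_neg hk]

-- max characterization: the take-m mismatch count is within budget iff m ≤ gExt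
theorem gExt_max (c : Char) :
    ∀ (l : List Char) (k : Int) (m : Nat), 0 ≤ k → m ≤ l.length →
      (((l.take m).countP (fun x => !(x == c)) : Int) ≤ k ↔ (m : Int) ≤ gExt c k l) := by
  intro l
  induction l with
  | nil =>
    intro k m hk hm
    have hm0 : m = 0 := by simpa using hm
    subst hm0
    simp [gExt, hk]
  | cons x xs ih =>
    intro k m hk hm
    cases m with
    | zero =>
      have h0 := gExt_nonneg c k (x :: xs)
      simp only [List.take_zero, List.countP_nil, Nat.cast_zero]
      constructor
      · intro _; exact h0
      · intro _; exact hk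
    | succ m' =>
      simp only [List.length_cons, Nat.succ_le_succ_iff] at hm
      simp only [List.take_succ_cons, List.countP_cons, gExt]
      by_cases h1 : (x == c) = true
      · have hxs := ih k m' hk hm
        simp only [h1, if_true, Bool.not_true, Bool.false_eq_true, if_false, Nat.add_zero]
        constructor
        · intro h; have := hxs.mp h; push_cast; omega
        · intro h; exact hxs.mpr (by push_cast at h; omega)
      · simp only [h1, Bool.not_eq_true] at *
        simp only [Bool.not_false, if_true, Bool.false_eq_true, if_false]
        by_cases h2 : k > 0
        · have hxs := ih (k - 1) m' (by omega) hm
          simp only [h2, if_true]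
          constructor
          · intro h; have := hxs.mp (by push_cast at h ⊢; omega); push_cast; omega
          · intro h; have := hxs.mpr (by push_cast at h ⊢; omega); push_cast at this ⊢; omega
        · simp only [h2, if_false]
          have hc : (0:Nat) ≤ (xs.take m').countP (fun x => !(x == c)) := Nat.zero_le _
          constructor
          · intro h; exfalso; push_cast at h; omega
          · intro h; exfalso; push_cast at h; omega

theorem innerA_eq (cs : List Char) (ci : Char) (n : Int) (hn : n ≤ (cs.length : Int)) :
    ∀ (fuel : Nat) (j count k : Int), (n - j).toNat = fuel → 0 ≤ j → j ≤ n →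
      (vasyaInner cs ci (PySem.List.pyRange j n 1) count k).1
        = count + gExt ci k ((cs.take n.toNat).drop j.toNat) := by
  intro fuel
  induction fuel with
  | zero =>
    intro j count k hf h0 hjn
    have hnj : n ≤ j := by omega
    rw [PySem.List.pyRange_one_eq_nil hnj]
    have hdrop : (cs.take n.toNat).drop j.toNat = [] := by
      apply List.drop_eq_nil_of_le
      simp only [List.length_take]
      omega
    simp [vasyaInner, hdrop, gExt]
  | succ fuel ih =>
    intro j count k hf h0 hjn
    have hlt : j < n := by omega
    have hjlen : j < (cs.length : Int) := by omega
    rw [PySem.List.pyRange_one_cons hlt]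
    have hjt : j.toNat < (cs.take n.toNat).length := by
      simp only [List.length_take]
      omega
    have hjc : j.toNat < cs.length := by omega
    have hget : PySem.List.pyGet? cs j = some cs[j.toNat] :=
      PySem.List.pyGet?_eq_some_getElem h0 hjlen (xs := cs)
    have hdrop : (cs.take n.toNat).drop j.toNat
        = cs[j.toNat] :: (cs.take n.toNat).drop (j.toNat + 1) := by
      rw [List.drop_eq_getElem_cons hjt, List.getElem_take]
    have hsucc : (j + 1).toNat = j.toNat + 1 := by omega
    have hrec := fun count k => ih (j + 1) count k (by omega) (by omega) (by omega)
    rw [hsucc] at hrec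
    simp only [vasyaInner, hget, hdrop, gExt]
    by_cases h1 : (cs[j.toNat] == ci) = true
    · simp only [h1, if_true]
      rw [hrec (count + 1) k]
      ring
    · simp only [h1, Bool.false_eq_true, if_false]
      by_cases h2 : k > 0
      · simp only [h2, if_true]
        rw [hrec (count + 1) (k - 1)]
        ring
      · simp only [h2, if_false]
        ring

-- prefAux appends the running prefix counts
def cntc (c : Char) (s : List Char) (m : Nat) : Int := ((s.take m).countP (fun x => x == c) : Int)

theorem prefAux_eq (c : Char) :
    ∀ (s : List Char) (out : List Int),
      prefAux c s out = out ++ (List.range s.length).map (fun m => out.getLastD 0 + cntc c s (m + 1)) := by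
  intro s
  induction s with
  | nil => intro out; simp [prefAux]
  | cons ch rest ih =>
    intro out
    simp only [prefAux]
    rw [ih]
    have hlast : (out ++ [out.getLastD 0 + (if ch == c then 1 else 0)]).getLastD 0
        = out.getLastD 0 + (if ch == c then 1 else 0) := by
      simp
    rw [hlast]
    simp only [List.length_cons, List.range_succ_eq_map, List.map_cons, List.map_map,
      List.append_assoc, List.singleton_append]
    congr 1
    have h1 : cntc c (ch :: rest) 1 = (if ch == c then 1 else 0) := by
      simp [cntc, List.countP_cons]
    rw [h1]
    congr 1
    apply List.map_congr_left
    intro m _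
    simp only [Function.comp]
    have h2 : cntc c (ch :: rest) (m + 1 + 1) = (if ch == c then 1 else 0) + cntc c rest (m + 1) := by
      simp only [cntc, List.take_succ_cons, List.countP_cons]
      by_cases h : (ch == c) = true <;> simp [h] <;> push_cast <;> ring
    rw [h2]
    ring

theorem prefixB_get (s : List Char) (c : Char) (m : Nat) (hm : m ≤ s.length) :
    PySem.List.pyGetD (prefixB s c) (m : Int) 0 = cntc c s m := by
  have h := prefAux_eq c s [0]
  simp only [prefixB] at *
  rw [h]
  have hl : ([(0:Int)]).getLastD 0 = 0 := rfl
  rw [hl]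
  simp only [List.singleton_append, zero_add]
  rw [PySem.List.pyGetD_natCast]
  cases m with
  | zero => simp [cntc]
  | succ m' =>
    have hm' : m' < s.length := by omega
    simp only [List.getD_cons_succ]
    rw [List.getD_eq_getElem?_getD, List.getElem?_map, List.getElem?_range hm']
    simp

theorem bsearch_eq (p : List Int) (i k m : Int) :
    ∀ (fuel : Nat) (lo hi : Int), (hi - lo).toNat = fuel → lo ≤ m → m ≤ hi →
      (∀ e, lo ≤ e → e ≤ hi →
        ((e - i - 1) - (PySem.List.pyGetD p e 0 - PySem.List.pyGetD p (i + 1) 0) ≤ k ↔ e ≤ m)) →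
      bsearch p i k lo hi = m := by
  intro fuel
  induction fuel using Nat.strong_induction_on with
  | _ fuel ih =>
    intro lo hi hf hlom hmhi hiff
    rw [bsearch]
    by_cases hlh : lo < hi
    · rw [dif_pos hlh]
      have hb := PySem.Int.floordiv_two_mid_bounds (lo := lo + 1) (hi := hi) (by omega)
      have he : lo + 1 + hi = lo + hi + 1 := by ring
      rw [he] at hb
      set mid := PySem.Int.floordiv (lo + hi + 1) 2 with hmid
      by_cases hc : (mid - i - 1) - (PySem.List.pyGetD p mid 0 - PySem.List.pyGetD p (i + 1) 0) ≤ k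
      · have hmlem : mid ≤ m := (hiff mid (by omega) (by omega)).mp hc
        rw [if_pos hc]
        exact ih (hi - mid).toNat (by omega) mid hi rfl hmlem hmhi
          (fun e he1 he2 => hiff e (by omega) he2)
      · have hmgt : m < mid := by
          by_contra h
          have h : mid ≤ m := by omega
          exact hc ((hiff mid (by omega) (by omega)).mpr h)
        rw [if_neg hc]
        exact ih (mid - 1 - lo).toNat (by omega) lo (mid - 1) rfl hlom (by omega)
          (fun e he1 he2 => hiff e he1 (by omega))
    · rw [dif_neg hlh]
      omega

-- the dict comprehension maps every character of s to its prefix-count list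
theorem pre_get (s : List Char) (ci : Char) (hci : ci ∈ s) :
    ((PySem.Set.ofList s).foldl (fun d c => d.insert c (prefixB s c)) PySem.Dict.empty).get? ci
      = some (prefixB s ci) := by
  apply PySem.Dict.get?_of_mem_items
  · rw [PySem.Dict.items_foldl_insert_fresh (k := fun c => c) (v := fun c => prefixB s c)
      (l := PySem.Set.ofList s) (d := PySem.Dict.empty)
      (by intro a _; simp [PySem.Dict.contains_empty])
      (by simpa using PySem.Set.nodup_ofList (xs := s))]
    simp only [PySem.Dict.items, PySem.Dict.empty, List.nil_append]
    exact List.mem_map.mpr ⟨ci, (PySem.Set.mem_ofList s ci).mpr hci, rfl⟩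
  · exact PySem.Dict.nodup_keys_foldl_insert _ (fun d c => prefixB s c) _ (by simp [PySem.Dict.keys_empty])

-- one outer-loop step of A equals one of B
theorem step_eq (cs : List Char) (n kere i ans : Int)
    (hnlen : n ≤ (cs.length : Int)) (hi0 : 0 ≤ i) (hin : i < n - 1) :
    vasyaStepA cs kere n (1, ans, kere) i
      = (1, vasyaStepB (cs.take n.toNat)
          ((PySem.Set.ofList (cs.take n.toNat)).foldl
            (fun d c => d.insert c (prefixB (cs.take n.toNat) c)) PySem.Dict.empty)
          (if kere > 0 then kere else 0) n ans i, kere) := by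
  set s := cs.take n.toNat with hs
  set K : Int := if kere > 0 then kere else 0 with hK
  have hK0 : 0 ≤ K := by rw [hK]; split_ifs with h <;> omega
  have hn2 : 2 ≤ n := by omega
  have hslen : s.length = n.toNat := by rw [hs]; simp [List.length_take]; omega
  have hilen : i < (cs.length : Int) := by omega
  have hitn : i.toNat < cs.length := by omega
  have hits : i.toNat < s.length := by omega
  have hgetA : PySem.List.pyGet? cs i = some cs[i.toNat] :=
    PySem.List.pyGet?_eq_some_getElem hi0 hilen (xs := cs)
  have hsi : s[i.toNat]'hits = cs[i.toNat]'hitn := by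
    simp only [hs]
    exact List.getElem_take
  have hgetB : PySem.List.pyGet? s i = some cs[i.toNat] := by
    rw [PySem.List.pyGet?_eq_some_getElem hi0 (by omega) (xs := s)]
    exact congrArg some hsi
  set ci := cs[i.toNat] with hci
  have hmem : ci ∈ s := hsi ▸ List.getElem_mem hits
  set t := s.drop (i + 1).toNat with ht
  have htlen : t.length = s.length - (i + 1).toNat := by rw [ht]; simp
  set G := gExt ci K t with hG
  have hG0 : 0 ≤ G := gExt_nonneg ci K t
  have hGle : G ≤ (t.length : Int) := gExt_le_length ci K t
  -- A side: the inner loop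
  have hdropeq : (cs.take n.toNat).drop (i + 1).toNat = t := by rw [ht, hs]
  have hinner : (vasyaInner cs ci (PySem.List.pyRange (i + 1) n 1) 1 kere).1 = 1 + G := by
    rw [innerA_eq cs ci n hnlen (n - (i + 1)).toNat (i + 1) 1 kere rfl (by omega) (by omega)]
    rw [hdropeq, hG, gExt_clip, ← hK]
  -- B side: dict lookup then binary search
  have hpre := pre_get s ci hmem
  have hbs : bsearch (prefixB s ci) i K (i + 1) n = i + 1 + G := by
    apply bsearch_eq (prefixB s ci) i K (i + 1 + G) (n - (i + 1)).toNat (i + 1) n rfl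
      (by omega) (by omega)
    intro e he1 he2
    have he0 : 0 ≤ e := by omega
    have heTN : e = ((e.toNat : Nat) : Int) := by omega
    have hiTN : i + 1 = (((i + 1).toNat : Nat) : Int) := by omega
    have hesn : e.toNat ≤ s.length := by omega
    have hisn' : (i + 1).toNat ≤ s.length := by omega
    rw [heTN, hiTN, prefixB_get s ci e.toNat hesn, prefixB_get s ci (i + 1).toNat hisn']
    set mN := e.toNat - (i + 1).toNat with hmN
    have hmNt : mN ≤ t.length := by omega
    have hsplit : s.take e.toNat = s.take (i + 1).toNat ++ t.take mN := by
      rw [ht, hmN, ← List.take_add]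
      congr 1
      omega
    have hcnt : cntc ci s e.toNat - cntc ci s (i + 1).toNat
        = (((t.take mN).countP (fun x => x == ci)) : Int) := by
      simp only [cntc, hsplit, List.countP_append]
      push_cast
      ring
    have hlenmN : (t.take mN).length = mN := by simp [hmNt]
    have hcc : (t.take mN).countP (fun x => x == ci)
        + (t.take mN).countP (fun x => !(x == ci)) = mN := by
      have h0 := List.length_eq_countP_add_countP (p := fun x => x == ci) (l := t.take mN)
      have h1 : (t.take mN).countP (fun a => decide ¬((a == ci) = true))
          = (t.take mN).countP (fun x => !(x == ci)) :=
        List.countP_congr (fun x _ => by simp)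
      rw [hlenmN, h1] at h0
      omega
    have hiff := gExt_max ci t K mN hK0 hmNt
    rw [hcnt]
    constructor
    · intro h
      have : (mN : Int) ≤ G := by
        rw [hG]
        apply hiff.mp
        push_cast at h ⊢
        omega
      omega
    · intro h
      have := hiff.mpr (by rw [← hG]; push_cast; omega)
      push_cast at this ⊢
      omega
  simp only [vasyaStepA, vasyaStepB, hgetA, hgetB, hpre, Option.getD_some, hinner, hbs]
  have harith : i + 1 + G - i = 1 + G := by ring
  rw [harith]

-- the two outer folds agree
theorem outer_eq (cs : List Char) (n kere : Int) (hnlen : n ≤ (cs.length : Int)) :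
    ∀ (R : List Int), (∀ i ∈ R, 0 ≤ i ∧ i < n - 1) → ∀ ans : Int,
      (R.foldl (vasyaStepA cs kere n) (1, ans, kere)).2.1
        = R.foldl (vasyaStepB (cs.take n.toNat)
            ((PySem.Set.ofList (cs.take n.toNat)).foldl
              (fun d c => d.insert c (prefixB (cs.take n.toNat) c)) PySem.Dict.empty)
            (if kere > 0 then kere else 0) n) ans := by
  intro R
  induction R with
  | nil => intro _ ans; rfl
  | cons i rest ih =>
    intro hmem ans
    obtain ⟨hi0, hin⟩ := hmem i (by simp)
    simp only [List.foldl_cons]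
    rw [step_eq cs n kere i ans hnlen hi0 hin]
    exact ih (fun j hj => hmem j (by simp [hj])) _

theorem vasya_spec : Claim_equal_vasya := by
  intro n kere string _hdom hpre
  unfold Spec_vasya vasya vasya_alt
  by_cases hn : n ≤ 1
  · rw [PySem.List.pyRange_one_eq_nil (by omega)]
    rfl
  · have hnlen : n ≤ (string.toList.length : Int) := by
      rcases hpre with h | h
      · omega
      · exact h
    have hslice : PySem.List.slice string.toList none (some n)
        = string.toList.take n.toNat := PySem.List.slice_to string.toList (by omega)
    rw [hslice]
    exact outer_eq string.toList n kere hnlen (PySem.List.pyRange 0 (n - 1) 1)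
      (fun i hi => by
        rw [PySem.List.mem_pyRange_one] at hi
        exact ⟨hi.1, hi.2⟩) 1
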